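-- pv_equiv track=rewrite | github.com/harshchouhan3122/Technical_Interview_Question-Companywise- | TCS/5_GretestElement.py | greatestNums
-- ===== SOURCE A (Python) =====
-- def greatestNums(arr):
--     res = []
--     for i in range(len(arr)):
--         state = True
--         for j in range(i+1):
--             if arr[j] > arr[i]:
--                 state = False
--             if state == False:
--                 break
--         if state == True:
--             res.append(arr[i])
--     return res
-- ===== SOURCE B (Python) =====
-- def greatestNums(arr):
--     res = []
--     mx = None
--     for x in arr:
--         if mx is None or x >= mx:
--             res.append(x)
--             mx = x
--     return res
-- ===== Notes on version B (the rewrite author's own statement) =====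
-- stated objective: faster
-- what changed: Replaced the nested scan over all earlier elements by a single pass that tracks the running maximum and keeps an element iff it is >= that maximum.
import Mathlib
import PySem

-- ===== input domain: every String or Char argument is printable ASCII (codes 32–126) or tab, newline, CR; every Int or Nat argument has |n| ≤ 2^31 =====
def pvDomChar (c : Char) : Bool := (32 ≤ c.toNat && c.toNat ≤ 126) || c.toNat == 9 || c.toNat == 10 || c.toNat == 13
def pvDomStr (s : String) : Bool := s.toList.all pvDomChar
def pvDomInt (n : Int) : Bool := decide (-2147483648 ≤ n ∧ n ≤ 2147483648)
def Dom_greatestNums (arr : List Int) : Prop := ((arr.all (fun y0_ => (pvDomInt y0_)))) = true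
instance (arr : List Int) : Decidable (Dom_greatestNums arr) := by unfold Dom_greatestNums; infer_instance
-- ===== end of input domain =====

-- B replaces A's rescans of every prefix by one pass tracking the running maximum (same return value).

-- ===== PORT A =====
-- inner loop over j ∈ range(i+1): returns false at the first j with arr[j] > arr[i] (the break), else true
-- (indices produced by range are always in bounds, so indexing is ported with getD 0; it is exact here)
def gnInner (arr : List Int) (xi : Int) : List Nat → Bool
  | [] => true
  | j :: js => if arr.getD j 0 > xi then false else gnInner arr xi js

-- outer loop over i ∈ range(len(arr)) with accumulator res
def gnOuter (arr : List Int) : List Nat → List Int → List Int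
  | [], res => res
  | i :: is, res =>
      let xi := arr.getD i 0
      if gnInner arr xi (List.range (i+1)) = true then gnOuter arr is (res ++ [xi])
      else gnOuter arr is res

def greatestNums (arr : List Int) : List Int := gnOuter arr (List.range arr.length) []

-- ===== PORT B =====
-- single pass: mx is the running maximum (None before the first element)
def gnGo : List Int → Option Int → List Int → List Int
  | [], _, res => res
  | x :: xs, none, res => gnGo xs (some x) (res ++ [x])
  | x :: xs, some m, res =>
      if m ≤ x then gnGo xs (some x) (res ++ [x]) else gnGo xs (some m) res

def greatestNums_alt (arr : List Int) : List Int := gnGo arr none []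

-- ===== PRECONDITION & SPEC =====
def Spec_greatestNums (arr : List Int) (out : List Int) : Prop := out = greatestNums_alt arr
instance (arr : List Int) (out : List Int) : Decidable (Spec_greatestNums arr out) := by unfold Spec_greatestNums; infer_instance

-- ===== CLAIM (what is proved, stated in full; the proofs are below) =====
def Claim_equal_greatestNums : Prop := ∀ (arr : List Int), Dom_greatestNums arr → Spec_greatestNums arr (greatestNums arr)

-- ===== LEMMAS AND PROOFS =====

theorem gnOuter_acc (arr : List Int) (is : List Nat) (res : List Int) :
    gnOuter arr is res = res ++ gnOuter arr is [] := by
  induction is generalizing res with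
  | nil => simp [gnOuter]
  | cons i is ih =>
      simp only [gnOuter]
      split_ifs with h
      · rw [ih (res ++ _), ih ([] ++ _)]; simp
      · rw [ih res]

theorem gnOuter_append (arr : List Int) (is1 is2 : List Nat) (res : List Int) :
    gnOuter arr (is1 ++ is2) res = gnOuter arr is2 (gnOuter arr is1 res) := by
  induction is1 generalizing res with
  | nil => simp [gnOuter]
  | cons i is ih =>
      simp only [List.cons_append, gnOuter]
      split_ifs with h <;> rw [ih]

theorem gnGo_append (l1 l2 : List Int) (mx : Option Int) (res : List Int) :
    gnGo (l1 ++ l2) mx res =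
      gnGo l2 (l1.foldl (fun acc y => match acc with
        | none => some y
        | some m => if m ≤ y then some y else some m) mx) (gnGo l1 mx res) := by
  induction l1 generalizing mx res with
  | nil => simp [gnGo]
  | cons x l1 ih =>
      cases mx with
      | none => simp only [List.cons_append, gnGo, List.foldl]; rw [ih]
      | some m =>
          simp only [List.cons_append, gnGo, List.foldl]
          split_ifs with h <;> rw [ih]

-- the folded state is the running maximum
def mfold (mx : Option Int) (l : List Int) : Option Int :=
  l.foldl (fun acc y => match acc with
    | none => some y
    | some m => if m ≤ y then some y else some m) mx

theorem mfold_some (l : List Int) (m : Int) : mfold (some m) l = some (l.foldl max m) := by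
  induction l generalizing m with
  | nil => rfl
  | cons y l ih =>
      simp only [mfold, List.foldl] at *
      split_ifs with h
      · rw [show max m y = y by omega]; exact ih y
      · rw [show max m y = m by omega]; exact ih m

theorem mfold_none_iff (l : List Int) : mfold none l = none ↔ l = [] := by
  cases l with
  | nil => simp [mfold]
  | cons y l =>
      rw [show mfold none (y :: l) = mfold (some y) l from rfl, mfold_some]
      simp

theorem foldl_max_le (l : List Int) (m x : Int) :
    l.foldl max m ≤ x ↔ m ≤ x ∧ ∀ y ∈ l, y ≤ x := by
  induction l generalizing m with
  | nil => simp
  | cons y l ih =>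
      simp only [List.foldl, ih, List.mem_cons]
      constructor
      · rintro ⟨h1, h2⟩
        exact ⟨le_trans (le_max_left _ _) h1, fun z hz => hz.elim (fun e => e ▸ le_trans (le_max_right _ _) h1) (h2 z)⟩
      · rintro ⟨h1, h2⟩
        exact ⟨max_le h1 (h2 y (Or.inl rfl)), fun z hz => h2 z (Or.inr hz)⟩

-- A's inner loop is an "all ≤" test
theorem gnInner_eq_all (arr : List Int) (xi : Int) (js : List Nat) :
    gnInner arr xi js = js.all (fun j => decide (arr.getD j 0 ≤ xi)) := by
  induction js with
  | nil => rfl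
  | cons j js ih =>
      by_cases h : arr.getD j 0 ≤ xi
      · simp only [gnInner, List.all_cons]
        rw [if_neg (by omega), decide_eq_true h, Bool.true_and, ih]
      · simp only [gnInner, List.all_cons]
        rw [if_pos (by omega), decide_eq_false h, Bool.false_and]

-- appending an element does not change the processing of the earlier indices
theorem gnInner_congr (l : List Int) (x xi : Int) (js : List Nat)
    (h : ∀ j ∈ js, j < l.length) :
    gnInner (l ++ [x]) xi js = gnInner l xi js := by
  induction js with
  | nil => rfl
  | cons j js ih =>
      have hj : j < l.length := h j (List.mem_cons_self ..)
      simp only [gnInner, List.getD_append _ _ _ _ hj]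
      split_ifs with hc
      · rfl
      · exact ih (fun k hk => h k (List.mem_cons_of_mem _ hk))

theorem gnOuter_congr (l : List Int) (x : Int) (is : List Nat) (res : List Int)
    (h : ∀ i ∈ is, i < l.length) :
    gnOuter (l ++ [x]) is res = gnOuter l is res := by
  induction is generalizing res with
  | nil => rfl
  | cons i is ih =>
      have hi : i < l.length := h i (List.mem_cons_self ..)
      have hcong : gnInner (l ++ [x]) (l.getD i 0) (List.range (i+1))
          = gnInner l (l.getD i 0) (List.range (i+1)) :=
        gnInner_congr l x _ _ (fun j hj => by have := List.mem_range.mp hj; omega)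
      simp only [gnOuter, List.getD_append _ _ _ _ hi]
      rw [hcong]
      split_ifs with hc
      · exact ih _ (fun k hk => h k (List.mem_cons_of_mem _ hk))
      · exact ih _ (fun k hk => h k (List.mem_cons_of_mem _ hk))

theorem all_range_getD (l : List Int) (x : Int) :
    ((List.range (l.length + 1)).all (fun j => decide ((l ++ [x]).getD j 0 ≤ x)) = true)
      ↔ ∀ y ∈ l, y ≤ x := by
  rw [List.all_eq_true]
  constructor
  · intro h y hy
    obtain ⟨j, hj, rfl⟩ := List.getElem_of_mem hy
    have h2 := h j (List.mem_range.mpr (by omega))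
    rw [decide_eq_true_iff, List.getD_append _ _ _ _ hj, List.getD_eq_getElem l 0 hj] at h2
    exact h2
  · intro h j hj
    rw [decide_eq_true_iff]
    have hjlt := List.mem_range.mp hj
    rcases Nat.lt_or_ge j l.length with hlt | hge
    · rw [List.getD_append _ _ _ _ hlt, List.getD_eq_getElem l 0 hlt]
      exact h _ (List.getElem_mem hlt)
    · have hje : j = l.length := by omega
      subst hje
      rw [show (l ++ [x]).getD l.length 0 = x from by simp [List.getD_eq_getElem?_getD]]

theorem main_eq (arr : List Int) : greatestNums arr = greatestNums_alt arr := by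
  induction arr using List.reverseRecOn with
  | nil => rfl
  | append_singleton l x ih =>
      have hA : greatestNums (l ++ [x]) =
          greatestNums l ++
            (if gnInner (l ++ [x]) x (List.range (l.length + 1)) = true then [x] else []) := by
        unfold greatestNums
        rw [List.length_append, List.length_singleton]
        conv_lhs => rw [List.range_succ]
        rw [gnOuter_append, gnOuter_congr l x _ _ (fun i hi => List.mem_range.mp hi)]
        have hx : (l ++ [x]).getD l.length 0 = x := by
          simp [List.getD_eq_getElem?_getD]
        simp only [gnOuter, hx]
        split_ifs with h
        · rw [gnOuter_acc]
        · simp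
      have hB : greatestNums_alt (l ++ [x]) =
          greatestNums_alt l ++
            (match mfold none l with
              | none => [x]
              | some m => if m ≤ x then [x] else []) := by
        unfold greatestNums_alt
        rw [gnGo_append]
        cases hm : mfold none l with
        | none =>
            simp only [mfold] at hm
            rw [hm]
            simp [gnGo]
        | some m =>
            simp only [mfold] at hm
            rw [hm]
            simp only [gnGo]
            split_ifs with h <;> simp
      rw [hA, hB, ih]
      congr 1
      have hcond : (gnInner (l ++ [x]) x (List.range (l.length + 1)) = true) ↔ ∀ y ∈ l, y ≤ x := by
        rw [gnInner_eq_all]; exact all_range_getD l x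
      cases hm : mfold none l with
      | none =>
          have hl : l = [] := (mfold_none_iff l).mp hm
          subst hl
          rw [if_pos (hcond.mpr (by simp))]
      | some m =>
          cases l with
          | nil => simp [mfold] at hm
          | cons y l' =>
              have hm' : m = List.foldl max y l' := by
                have h1 := mfold_some l' y
                rw [show mfold none (y :: l') = mfold (some y) l' from rfl, h1] at hm
                exact (Option.some.inj hm).symm
              subst hm'
              have h2 : (List.foldl max y l' ≤ x) ↔ ∀ y' ∈ (y :: l'), y' ≤ x := by
                rw [foldl_max_le]
                constructor
                · rintro ⟨ha, hb⟩ z hz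
                  rcases List.mem_cons.mp hz with rfl | hz'
                  exacts [ha, hb z hz']
                · intro h
                  exact ⟨h y (List.mem_cons_self ..), fun z hz => h z (List.mem_cons_of_mem _ hz)⟩
              by_cases h : ∀ y' ∈ (y :: l'), y' ≤ x
              · have hle := h2.mpr h
                rw [if_pos (hcond.mpr h)]
                simp [hle]
              · have hnot : ¬ List.foldl max y l' ≤ x := fun c => h (h2.mp c)
                rw [if_neg (fun c => h (hcond.mp c))]
                simp [hnot]

-- ===== VERDICT (by name: the statement is the Claim_ definition above) =====
theorem greatestNums_spec : Claim_equal_greatestNums := by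
  intro arr _
  unfold Spec_greatestNums
  exact main_eq arr
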